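-- pv_equiv track=rewrite | github.com/Yinkun-Cheng/RAG | ai-service/app/tool/validation_tools.py | _check_point_coverage
-- ===== SOURCE A (Python) =====
-- from typing import List, Dict, Any, Tuple
--
-- def _check_point_coverage(
--
--     point: str,
--     test_cases: List[Dict[str, Any]]
-- ) -> bool:
--     """
--     检查某个功能点是否被测试用例覆盖。
--
--     Args:
--         point: 功能点描述
--         test_cases: 测试用例列表
--
--     Returns:
--         是否被覆盖
--     """
--     point_lower = point.lower()
--
--     # 检查测试用例标题或前置条件中是否包含功能点关键词
--     for tc in test_cases:
--         title = tc.get("title", "").lower()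
--         preconditions = tc.get("preconditions", "").lower()
--         expected_result = tc.get("expected_result", "").lower()
--
--         # 提取功能点的关键词（简单分词）
--         keywords = [w for w in point_lower.split() if len(w) > 2]
--
--         # 如果标题、前置条件或预期结果中包含关键词，认为已覆盖
--         for keyword in keywords:
--             if (keyword in title or
--                 keyword in preconditions or
--                 keyword in expected_result):
--                 return True
--
--     return False
-- ===== SOURCE B (Python) =====
-- def _check_point_coverage(point, test_cases):
--     # Extract keywords once, concatenate every searched field into one corpus,
--     # then do a single substring scan per keyword.
--     keywords = [w for w in point.lower().split() if len(w) > 2]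
--     parts = []
--     for tc in test_cases:
--         parts.append(tc.get("title", "").lower())
--         parts.append(tc.get("preconditions", "").lower())
--         parts.append(tc.get("expected_result", "").lower())
--     corpus = "\n".join(parts)
--     return any(kw in corpus for kw in keywords)
-- ===== Notes on version B (the rewrite author's own statement) =====
-- stated objective: simpler
-- what changed: Keywords are extracted once instead of per test case, and the per-test-case, per-field nested membership checks are replaced by one newline-joined corpus string searched once per keyword (keywords contain no whitespace, so no match can span the separator).
import Mathlib
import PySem

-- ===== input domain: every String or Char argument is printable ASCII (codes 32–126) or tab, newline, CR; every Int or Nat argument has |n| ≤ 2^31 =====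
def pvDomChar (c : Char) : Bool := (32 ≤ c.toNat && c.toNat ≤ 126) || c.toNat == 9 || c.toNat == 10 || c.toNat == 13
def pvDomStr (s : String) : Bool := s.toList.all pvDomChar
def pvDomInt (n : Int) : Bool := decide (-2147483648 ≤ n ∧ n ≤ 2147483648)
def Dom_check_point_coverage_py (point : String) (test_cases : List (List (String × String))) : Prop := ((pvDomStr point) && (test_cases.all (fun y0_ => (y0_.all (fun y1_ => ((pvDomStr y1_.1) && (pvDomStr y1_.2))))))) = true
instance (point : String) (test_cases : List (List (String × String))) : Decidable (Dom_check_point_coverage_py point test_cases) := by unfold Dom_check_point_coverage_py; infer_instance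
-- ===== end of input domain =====

-- B extracts the keywords once and searches a single newline-joined corpus of all lowered
-- fields instead of A's per-test-case, per-field nested checks (objective: simpler).

-- ===== PORT A =====
-- the 'for tc in test_cases: … return True' loop of A
def pvALoop (point_lower : String) : List (List (String × String)) → Bool
  | [] => false
  | tc :: rest =>
    let title := PySem.Str.lower (PySem.Dict.getD (PySem.Dict.mk tc) "title" "")
    let preconditions := PySem.Str.lower (PySem.Dict.getD (PySem.Dict.mk tc) "preconditions" "")
    let expected_result := PySem.Str.lower (PySem.Dict.getD (PySem.Dict.mk tc) "expected_result" "")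
    let keywords := (PySem.Str.split₀ point_lower).filter (fun w => 2 < PySem.Str.len w)
    if keywords.any (fun keyword =>
        PySem.Str.isIn keyword title || PySem.Str.isIn keyword preconditions ||
        PySem.Str.isIn keyword expected_result)
    then true
    else pvALoop point_lower rest

def check_point_coverage_py (point : String) (test_cases : List (List (String × String))) : Bool :=
  let point_lower := PySem.Str.lower point
  pvALoop point_lower test_cases

-- ===== PORT B =====
def check_point_coverage_py_alt (point : String) (test_cases : List (List (String × String))) : Bool :=
  let keywords := (PySem.Str.split₀ (PySem.Str.lower point)).filter (fun w => 2 < PySem.Str.len w)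
  let parts := test_cases.flatMap (fun tc =>
    [PySem.Str.lower (PySem.Dict.getD (PySem.Dict.mk tc) "title" ""),
     PySem.Str.lower (PySem.Dict.getD (PySem.Dict.mk tc) "preconditions" ""),
     PySem.Str.lower (PySem.Dict.getD (PySem.Dict.mk tc) "expected_result" "")])
  let corpus := PySem.Str.join "\n" parts
  keywords.any (fun kw => PySem.Str.isIn kw corpus)

-- ===== PRECONDITION & SPEC =====
def Spec_check_point_coverage_py (point : String) (test_cases : List (List (String × String))) (out : Bool) : Prop := out = check_point_coverage_py_alt point test_cases
instance (point : String) (test_cases : List (List (String × String))) (out : Bool) : Decidable (Spec_check_point_coverage_py point test_cases out) := by unfold Spec_check_point_coverage_py; infer_instance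

-- ===== CLAIM (what is proved, stated in full; the proofs are below) =====
def Claim_equal_check_point_coverage_py : Prop := ∀ (point : String) (test_cases : List (List (String × String))), Dom_check_point_coverage_py point test_cases → Spec_check_point_coverage_py point test_cases (check_point_coverage_py point test_cases)

-- ===== LEMMAS AND PROOFS =====

-- definitional unfoldings of Python str.split()'s worker
theorem pv_go_nil (cur : List Char) (acc : List (List Char)) :
    PySem.Chars.split₀.go [] cur acc =
      if cur.isEmpty then acc.reverse else (cur.reverse :: acc).reverse := rfl

theorem pv_go_cons (c : Char) (rest cur : List Char) (acc : List (List Char)) :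
    PySem.Chars.split₀.go (c :: rest) cur acc =
      if PySem.Chars.isspace c then
        (if cur.isEmpty then PySem.Chars.split₀.go rest [] acc
         else PySem.Chars.split₀.go rest [] (cur.reverse :: acc))
      else PySem.Chars.split₀.go rest (c :: cur) acc := rfl

-- every word produced by Python's str.split() consists of non-whitespace characters
theorem pv_split₀_go_nonspace (s cur : List Char) (acc : List (List Char))
    (hacc : ∀ w ∈ acc, ∀ c ∈ w, PySem.Chars.isspace c = false)
    (hcur : ∀ c ∈ cur, PySem.Chars.isspace c = false) :
    ∀ w ∈ PySem.Chars.split₀.go s cur acc, ∀ c ∈ w, PySem.Chars.isspace c = false := by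
  induction s generalizing cur acc with
  | nil =>
    intro w hw
    rw [pv_go_nil] at hw
    split at hw
    · exact hacc w (List.mem_reverse.mp hw)
    · rcases List.mem_cons.mp (List.mem_reverse.mp hw) with h | h
      · intro c hc; exact hcur c (List.mem_reverse.mp (h ▸ hc))
      · exact hacc w h
  | cons c rest ih =>
    intro w hw
    rw [pv_go_cons] at hw
    by_cases hs : PySem.Chars.isspace c = true
    · rw [if_pos hs] at hw
      split at hw
      · exact ih [] acc hacc (by simp) w hw
      · refine ih [] (cur.reverse :: acc) ?_ (by simp) w hw
        intro w' hw' c' hc'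
        rcases List.mem_cons.mp hw' with h | h
        · exact hcur c' (List.mem_reverse.mp (h ▸ hc'))
        · exact hacc w' h c' hc'
    · rw [if_neg hs] at hw
      refine ih (c :: cur) acc hacc ?_ w hw
      intro c' hc'
      rcases List.mem_cons.mp hc' with h | h
      · exact h ▸ eq_false_of_ne_true hs
      · exact hcur c' h

theorem pv_split₀_nonspace (s : List Char) :
    ∀ w ∈ PySem.Chars.split₀ s, ∀ c ∈ w, PySem.Chars.isspace c = false := by
  exact pv_split₀_go_nonspace s [] [] (by simp) (by simp)

-- a prefix of u ++ v that fits inside u is a prefix of u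
theorem pv_prefix_of_prefix_append {α : Type} (kw u v : List α)
    (h : kw <+: u ++ v) (hle : kw.length ≤ u.length) : kw <+: u := by
  rw [List.prefix_iff_eq_take] at h ⊢
  rwa [List.take_append_of_le_length hle] at h

-- an infix containing no c and lying inside u ++ c :: v lies inside u or inside v
theorem pv_infix_append_cons {α : Type} (kw : List α) (c : α)
    (hne : kw ≠ []) (hc : c ∉ kw) :
    ∀ (u v : List α), kw <:+: u ++ c :: v ↔ (kw <:+: u ∨ kw <:+: v) := by
  intro u v
  constructor
  · intro h
    induction u with
    | nil =>
      simp only [List.nil_append] at h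
      rcases List.infix_cons_iff.mp h with hpre | hinf
      · exfalso
        obtain ⟨k, ks, rfl⟩ := List.exists_cons_of_ne_nil hne
        obtain ⟨t, ht⟩ := hpre
        injection ht with h1 _
        exact hc (h1 ▸ List.mem_cons_self)
      · exact Or.inr hinf
    | cons x u' ihu =>
      rcases List.infix_cons_iff.mp h with hpre | hinf
      · by_cases hlen : kw.length ≤ (x :: u').length
        · exact Or.inl (List.IsPrefix.isInfix
            (pv_prefix_of_prefix_append kw (x :: u') (c :: v) (by simpa using hpre) hlen))
        · exfalso
          push Not at hlen
          have hidx : (x :: u').length < kw.length := hlen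
          have heq : kw[(x :: u').length]'hidx =
              ((x :: u') ++ c :: v)[(x :: u').length]'(by simp) := by
            exact List.IsPrefix.getElem (by simpa using hpre) hidx
          have : ((x :: u') ++ c :: v)[(x :: u').length]'(by simp) = c := by
            simp
          exact hc ((heq.trans this) ▸ List.getElem_mem hidx)
      · rcases ihu hinf with h' | h'
        · exact Or.inl (List.infix_cons_iff.mpr (Or.inr h'))
        · exact Or.inr h'
  · rintro (⟨s, t, rfl⟩ | ⟨s, t, rfl⟩)
    · exact ⟨s, t ++ c :: v, by simp⟩
    · exact ⟨(u ++ c :: s), t, by simp⟩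

-- a newline-free nonempty word is an infix of the '\n'-joined corpus iff it is an infix of a part
theorem pv_infix_join (kw : List Char) (hne : kw ≠ []) (hc : '\n' ∉ kw) :
    ∀ parts : List (List Char),
      (kw <:+: PySem.Chars.join ['\n'] parts ↔ ∃ p ∈ parts, kw <:+: p) := by
  intro parts
  induction parts with
  | nil =>
    simp [PySem.Chars.join_nil, List.infix_nil, hne]
  | cons p ps ih =>
    cases ps with
    | nil => simp [PySem.Chars.join_singleton]
    | cons q rest =>
      rw [PySem.Chars.join_cons_cons]
      have : p ++ ['\n'] ++ PySem.Chars.join ['\n'] (q :: rest)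
           = p ++ '\n' :: PySem.Chars.join ['\n'] (q :: rest) := by simp
      rw [this, pv_infix_append_cons kw '\n' hne hc]
      rw [ih]
      simp only [List.mem_cons]
      constructor
      · rintro (h | ⟨x, hx, h⟩)
        · exact ⟨p, Or.inl rfl, h⟩
        · exact ⟨x, Or.inr hx, h⟩
      · rintro ⟨x, (rfl | hx), h⟩
        · exact Or.inl h
        · exact Or.inr ⟨x, hx, h⟩

-- A's outer loop is an existential over the test cases
theorem pv_aLoop_eq_any (pl : String) (tcs : List (List (String × String))) :
    pvALoop pl tcs = tcs.any (fun tc =>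
      ((PySem.Str.split₀ pl).filter (fun w => 2 < PySem.Str.len w)).any (fun keyword =>
        PySem.Str.isIn keyword (PySem.Str.lower (PySem.Dict.getD (PySem.Dict.mk tc) "title" "")) ||
        PySem.Str.isIn keyword (PySem.Str.lower (PySem.Dict.getD (PySem.Dict.mk tc) "preconditions" "")) ||
        PySem.Str.isIn keyword (PySem.Str.lower (PySem.Dict.getD (PySem.Dict.mk tc) "expected_result" "")))) := by
  induction tcs with
  | nil => rfl
  | cons tc rest ih =>
    rw [List.any_cons, ← ih]
    show (if _ then _ else _) = _
    split <;> simp_all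

-- keywords kept by the filter are nonempty and newline-free
theorem pv_keyword_prop (pl : String) (kw : String)
    (hkw : kw ∈ (PySem.Str.split₀ pl).filter (fun w => 2 < PySem.Str.len w)) :
    kw.toList ≠ [] ∧ '\n' ∉ kw.toList := by
  rw [List.mem_filter] at hkw
  obtain ⟨hmem, hlen⟩ := hkw
  have hchars : kw.toList ∈ PySem.Chars.split₀ pl.toList := by
    rw [← PySem.Str.split₀_map_toList]
    exact List.mem_map_of_mem hmem
  have hns := pv_split₀_nonspace pl.toList kw.toList hchars
  constructor
  · intro h
    rw [PySem.Str.len_eq, h] at hlen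
    simp at hlen
  · intro h
    have := hns '\n' h
    simp [PySem.Chars.isspace] at this

theorem pv_main (point : String) (test_cases : List (List (String × String))) :
    check_point_coverage_py point test_cases = check_point_coverage_py_alt point test_cases := by
  unfold check_point_coverage_py check_point_coverage_py_alt
  simp only []
  rw [pv_aLoop_eq_any]
  rw [Bool.eq_iff_iff]
  simp only [List.any_eq_true]
  constructor
  · rintro ⟨tc, htc, kw, hkw, hhit⟩
    refine ⟨kw, hkw, ?_⟩
    obtain ⟨hne, hnl⟩ := pv_keyword_prop _ kw hkw
    have hsep : "\n".toList = ['\n'] := by decide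
    rw [PySem.Str.isIn_iff_infix, PySem.Str.toList_join, hsep,
       pv_infix_join kw.toList hne hnl]
    simp only [List.map_flatMap, List.mem_flatMap]
    rcases (by simpa using hhit : (_ ∨ _) ∨ _) with h | h3
    · rcases h with h1 | h2
      · exact ⟨(PySem.Str.lower (PySem.Dict.getD (PySem.Dict.mk tc) "title" "")).toList,
          ⟨tc, htc, by simp⟩, by simpa [PySem.Chars.isIn_iff_infix] using h1⟩
      · exact ⟨(PySem.Str.lower (PySem.Dict.getD (PySem.Dict.mk tc) "preconditions" "")).toList,
          ⟨tc, htc, by simp⟩, by simpa [PySem.Chars.isIn_iff_infix] using h2⟩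
    · exact ⟨(PySem.Str.lower (PySem.Dict.getD (PySem.Dict.mk tc) "expected_result" "")).toList,
        ⟨tc, htc, by simp⟩, by simpa [PySem.Chars.isIn_iff_infix] using h3⟩
  · rintro ⟨kw, hkw, hhit⟩
    obtain ⟨hne, hnl⟩ := pv_keyword_prop _ kw hkw
    have hsep : "\n".toList = ['\n'] := by decide
    rw [PySem.Str.isIn_iff_infix, PySem.Str.toList_join, hsep,
       pv_infix_join kw.toList hne hnl] at hhit
    simp only [List.map_flatMap, List.mem_flatMap] at hhit
    obtain ⟨p, ⟨tc, htc, hp⟩, hinf⟩ := hhit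
    refine ⟨tc, htc, kw, hkw, ?_⟩
    simp only [List.map_cons, List.map_nil, List.mem_cons, List.not_mem_nil, or_false] at hp
    rcases hp with rfl | rfl | rfl
    · have h2 := (PySem.Chars.isIn_iff_infix _ _).mpr (by simpa using hinf :
        kw.toList <:+: PySem.Chars.lower (PySem.Dict.getD (PySem.Dict.mk tc) "title" "").toList)
      simp [h2]
    · have h2 := (PySem.Chars.isIn_iff_infix _ _).mpr (by simpa using hinf :
        kw.toList <:+: PySem.Chars.lower (PySem.Dict.getD (PySem.Dict.mk tc) "preconditions" "").toList)
      simp [h2]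
    · have h2 := (PySem.Chars.isIn_iff_infix _ _).mpr (by simpa using hinf :
        kw.toList <:+: PySem.Chars.lower (PySem.Dict.getD (PySem.Dict.mk tc) "expected_result" "").toList)
      simp [h2]

-- ===== VERDICT (by name: the statement is the Claim_ definition above) =====
theorem check_point_coverage_py_spec : Claim_equal_check_point_coverage_py := by
  intro point test_cases _
  exact pv_main point test_cases
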